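-- pv_equiv track=rewrite | github.com/sujitpursuit/exceldiff | debug_section_detection.py | count_empty_columns_before
-- ===== SOURCE A (Python) =====
-- def count_empty_columns_before(col_num: int, headers: dict, start_col: int) -> int:
--     """Count empty columns between start_col and col_num."""
--     if col_num <= start_col:
--         return 0
--
--     empty_count = 0
--     for check_col in range(start_col + 1, col_num):
--         if check_col not in headers or not headers.get(check_col, "").strip():
--             empty_count += 1
--
--     return empty_count
-- ===== SOURCE B (Python) =====
-- def count_empty_columns_before(col_num: int, headers: dict, start_col: int) -> int:
--     """Count empty columns between start_col and col_num."""
--     if col_num <= start_col: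
--         return 0
--     total = col_num - start_col - 1
--     non_empty = 0
--     for k, v in headers.items():
--         if start_col < k < col_num and v.strip():
--             non_empty += 1
--     return total - non_empty
-- ===== Notes on version B (the rewrite author's own statement) =====
-- stated objective: alternative
-- what changed: Instead of scanning every integer position in the gap and testing dict membership, B iterates once over the dict's items counting the non-empty in-range headers and subtracts that from the gap width.
import Mathlib
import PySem

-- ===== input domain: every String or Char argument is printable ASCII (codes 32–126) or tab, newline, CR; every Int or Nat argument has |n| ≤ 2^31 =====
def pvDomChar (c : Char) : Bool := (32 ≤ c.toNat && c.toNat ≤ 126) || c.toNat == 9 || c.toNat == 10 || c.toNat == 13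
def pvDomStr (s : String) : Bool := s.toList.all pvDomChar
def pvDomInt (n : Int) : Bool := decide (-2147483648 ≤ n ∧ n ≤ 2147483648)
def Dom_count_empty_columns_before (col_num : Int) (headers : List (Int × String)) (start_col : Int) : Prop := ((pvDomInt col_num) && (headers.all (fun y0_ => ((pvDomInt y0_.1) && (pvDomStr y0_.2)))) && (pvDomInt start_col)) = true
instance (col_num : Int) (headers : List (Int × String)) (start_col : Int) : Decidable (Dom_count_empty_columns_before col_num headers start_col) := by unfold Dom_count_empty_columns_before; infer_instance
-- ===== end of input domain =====

-- B counts the non-empty in-range header entries in one pass over the dict's items and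
-- subtracts from the gap width, instead of scanning every integer position in the gap (alternative).


-- ===== PORT A =====
-- for check_col in range(start_col+1, col_num):
--   if check_col not in headers or not headers.get(check_col, "").strip(): empty_count += 1
def count_empty_columns_before (col_num : Int) (headers : List (Int × String)) (start_col : Int) : Int :=
  if col_num ≤ start_col then 0
  else
    (PySem.List.pyRange (start_col + 1) col_num 1).foldl
      (fun empty_count check_col =>
        if !(PySem.Dict.mk headers).contains check_col
           || (PySem.Str.strip ((PySem.Dict.mk headers).getD check_col "") == "")
        then empty_count + 1 else empty_count) 0

-- ===== PORT B =====
-- total = gap width; one pass over headers.items() counting non-empty in-range entries; total - non_empty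
def count_empty_columns_before_alt (col_num : Int) (headers : List (Int × String)) (start_col : Int) : Int :=
  if col_num ≤ start_col then 0
  else
    let total := col_num - start_col - 1
    let non_empty := headers.foldl
      (fun non_empty kv =>
        if decide (start_col < kv.1) && decide (kv.1 < col_num) && !(PySem.Str.strip kv.2 == "")
        then non_empty + 1 else non_empty) 0
    total - non_empty

-- ===== PRECONDITION & SPEC =====
-- Pre_: the association list represents a Python dict, whose keys are necessarily distinct;
-- it excludes no Python-representable input (a dict cannot hold duplicate keys).
def Pre_count_empty_columns_before (col_num : Int) (headers : List (Int × String)) (start_col : Int) : Prop :=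
  (headers.map Prod.fst).Nodup
instance (col_num : Int) (headers : List (Int × String)) (start_col : Int) : Decidable (Pre_count_empty_columns_before col_num headers start_col) := by unfold Pre_count_empty_columns_before; infer_instance

def pvWitness_count_empty_columns_before : Int × (List (Int × String)) × Int := (10, [(3, " x "), (5, "  "), (7, "y")], 2)

def Spec_count_empty_columns_before (col_num : Int) (headers : List (Int × String)) (start_col : Int) (out : Int) : Prop := out = count_empty_columns_before_alt col_num headers start_col
instance (col_num : Int) (headers : List (Int × String)) (start_col : Int) (out : Int) : Decidable (Spec_count_empty_columns_before col_num headers start_col out) := by unfold Spec_count_empty_columns_before; infer_instance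

-- ===== CLAIM (what is proved, stated in full; the proofs are below) =====
def Claim_equal_count_empty_columns_before : Prop := ∀ (col_num : Int) (headers : List (Int × String)) (start_col : Int), Dom_count_empty_columns_before col_num headers start_col → Pre_count_empty_columns_before col_num headers start_col → Spec_count_empty_columns_before col_num headers start_col (count_empty_columns_before col_num headers start_col)

-- ===== LEMMAS AND PROOFS =====

-- A's per-position test, negated: position c carries a non-empty header in the dict `headers`.
def pvFull (headers : List (Int × String)) (c : Int) : Bool :=
  (PySem.Dict.mk headers).contains c && !(PySem.Str.strip ((PySem.Dict.mk headers).getD c "") == "")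

-- Counting with two predicates that agree off a single point k not satisfying q.
theorem pv_countP_update {α : Type} [DecidableEq α] (l : List α) (hl : l.Nodup)
    (p q : α → Bool) (k : α) (hpq : ∀ c, c ≠ k → p c = q c) (hq : q k = false) :
    l.countP p = l.countP q + (if k ∈ l ∧ p k then 1 else 0) := by
  induction l with
  | nil => simp
  | cons a t ih =>
    rcases List.nodup_cons.mp hl with ⟨hat, hnt⟩
    by_cases hak : a = k
    · subst hak
      have ht : t.countP p = t.countP q :=
        List.countP_congr (fun c hc => by rw [hpq c (fun h => hat (h ▸ hc))])
      have hcond : (a ∈ a :: t ∧ p a = true) ↔ (p a = true) := by simp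
      rw [List.countP_cons, List.countP_cons, ht, hq, if_congr hcond rfl rfl]
      by_cases hp : p a = true <;> simp [hp]
    · have ht := ih hnt
      have hcond : (k ∈ a :: t ∧ p k = true) ↔ (k ∈ t ∧ p k = true) := by
        simp [List.mem_cons, Ne.symm hak]
      rw [List.countP_cons, List.countP_cons, hpq a hak, ht, if_congr hcond rfl rfl]
      omega

-- The core counting identity: over any nodup list of positions, the number of positions
-- carrying a non-empty header equals the number of header entries whose key is in the list
-- and whose value strips non-empty — provided the keys are distinct.
theorem pv_count_full (r : List Int) (hr : r.Nodup) (headers : List (Int × String))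
    (hn : (headers.map Prod.fst).Nodup) :
    r.countP (pvFull headers) =
      headers.countP (fun kv => decide (kv.1 ∈ r) && !(PySem.Str.strip kv.2 == "")) := by
  induction headers with
  | nil =>
    rw [List.countP_eq_zero.mpr, List.countP_nil]
    intro c _
    simp [pvFull, PySem.Dict.contains_mk]
  | cons kv t ih =>
    obtain ⟨k, v⟩ := kv
    rw [List.map_cons] at hn
    rcases List.nodup_cons.mp hn with ⟨hkt, hnt⟩
    have step : ∀ c, c ≠ k → pvFull ((k, v) :: t) c = pvFull t c := by
      intro c hck
      simp only [pvFull, PySem.Dict.contains_mk, PySem.Dict.getD_eq_get?_getD,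
        PySem.Dict.get?_mk_cons, List.any_cons]
      have : (k == c) = false := by simpa using fun h : k = c => hck h.symm
      simp [this]
    have hqk : pvFull t k = false := by
      have : ((PySem.Dict.mk t).contains k) = false := by
        simp only [PySem.Dict.contains_mk, List.any_eq_false]
        intro p hp
        simp only [beq_iff_eq]
        intro h
        exact hkt (List.mem_map.mpr ⟨p, hp, h⟩)
      simp [pvFull, this]
    have hpk : pvFull ((k, v) :: t) k = !(PySem.Str.strip v == "") := by
      simp [pvFull, PySem.Dict.contains_mk, PySem.Dict.getD_eq_get?_getD,
        PySem.Dict.get?_mk_cons]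
    rw [pv_countP_update r hr _ (pvFull t) k step hqk, ih hnt, List.countP_cons]
    by_cases hmem : k ∈ r <;> by_cases hv : PySem.Str.strip v = "" <;>
      simp [hmem, hv, hpk]

theorem count_empty_columns_before_spec_aux (col_num : Int) (headers : List (Int × String))
    (start_col : Int) (hn : (headers.map Prod.fst).Nodup) :
    count_empty_columns_before col_num headers start_col =
      count_empty_columns_before_alt col_num headers start_col := by
  unfold count_empty_columns_before count_empty_columns_before_alt
  by_cases h : col_num ≤ start_col
  · simp [h]
  · rw [if_neg h, if_neg h]
    rw [PySem.List.foldl_if_add_one, PySem.List.foldl_if_add_one]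
    have hlen := PySem.List.length_pyRange_one (start_col + 1) col_num
    have hsplit := List.length_eq_countP_add_countP (p := pvFull headers)
      (l := PySem.List.pyRange (start_col + 1) col_num 1)
    have hneg : (PySem.List.pyRange (start_col + 1) col_num 1).countP
        (fun a => decide ¬ pvFull headers a = true) =
        (PySem.List.pyRange (start_col + 1) col_num 1).countP
        (fun check_col => !(PySem.Dict.mk headers).contains check_col
          || (PySem.Str.strip ((PySem.Dict.mk headers).getD check_col "") == "")) := by
      apply List.countP_congr
      intro c _
      simp only [pvFull]
      by_cases h1 : (PySem.Dict.mk headers).contains c = true <;>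
        by_cases h2 : (PySem.Str.strip ((PySem.Dict.mk headers).getD c "") == "") = true <;>
        simp [h1, h2]
    have hfull := pv_count_full (PySem.List.pyRange (start_col + 1) col_num 1)
      (PySem.List.nodup_pyRange_one _ _) headers hn
    have hmem : headers.countP
        (fun kv => decide (kv.1 ∈ PySem.List.pyRange (start_col + 1) col_num 1)
          && !(PySem.Str.strip kv.2 == "")) =
        headers.countP (fun kv => decide (start_col < kv.1) && decide (kv.1 < col_num)
          && !(PySem.Str.strip kv.2 == "")) := by
      apply List.countP_congr
      intro kv _
      simp [PySem.List.mem_pyRange_one, and_assoc]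
    rw [hneg] at hsplit
    rw [hfull, hmem] at hsplit
    show (0:Int) + (List.countP _ _ : Int) = col_num - start_col - 1 - ((0:Int) + (List.countP _ _ : Int))
    have hlen' : ((PySem.List.pyRange (start_col + 1) col_num 1).length : Int)
        = col_num - start_col - 1 := by
      rw [hlen]; omega
    omega

-- ===== VERDICT (by name: the statement is the Claim_ definition above) =====
theorem count_empty_columns_before_spec : Claim_equal_count_empty_columns_before := by
  intro col_num headers start_col _ hpre
  exact count_empty_columns_before_spec_aux col_num headers start_col hpre
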